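-- pv_equiv track=rewrite | github.com/hyperlexus/pizza-eval | src/pizza_eval/utils.py | is_parenthese_lvl_fine
-- ===== SOURCE A (Python) =====
-- def is_parenthese_lvl_fine(condition):
--     insideGaensefuesschen = False
--     parantheseLvl = 0
--     for char in condition:
--         if char == "'":
--             insideGaensefuesschen = not insideGaensefuesschen
--         if insideGaensefuesschen:
--             continue
--         if char == "(":
--             parantheseLvl += 1
--         elif char == ")":
--             parantheseLvl -= 1
--     return parantheseLvl
-- ===== SOURCE B (Python) =====
-- def is_parenthese_lvl_fine(condition):
--     # Split on single quotes: even-indexed segments are outside quoted sections.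
--     def go(segs):
--         if not segs:
--             return 0
--         return segs[0].count("(") - segs[0].count(")") + go(segs[2:])
--     return go(condition.split("'"))
-- ===== Notes on version B (the rewrite author's own statement) =====
-- stated objective: faster
-- what changed: Replaces the per-character loop with an in/out toggle flag by splitting on single quotes and summing the open/close parenthesis count difference over the even-indexed (outside-quote) segments via a short recursion; the split and counts run in C.
import Mathlib
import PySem

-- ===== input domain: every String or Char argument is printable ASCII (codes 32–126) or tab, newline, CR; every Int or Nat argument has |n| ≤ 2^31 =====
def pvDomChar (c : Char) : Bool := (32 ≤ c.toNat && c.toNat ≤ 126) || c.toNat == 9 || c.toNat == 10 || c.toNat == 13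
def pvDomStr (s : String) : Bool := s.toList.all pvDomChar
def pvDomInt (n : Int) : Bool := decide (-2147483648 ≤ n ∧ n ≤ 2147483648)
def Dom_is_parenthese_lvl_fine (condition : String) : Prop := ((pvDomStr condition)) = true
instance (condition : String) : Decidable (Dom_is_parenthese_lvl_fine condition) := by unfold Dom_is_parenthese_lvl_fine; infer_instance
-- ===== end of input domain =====

-- B splits on single quotes and sums paren balances of the even-indexed (outside-quote)
-- segments; objective: faster (C-level split/count instead of a per-character Python loop).

-- ===== PORT A =====
-- loop body of A (toggle quote flag, then skip or adjust the level), one step per char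
def pvStepA (st : Bool × Int) (c : Char) : Bool × Int :=
  let inside := if c = '\'' then !st.1 else st.1
  if inside then (inside, st.2)
  else if c = '(' then (inside, st.2 + 1)
  else if c = ')' then (inside, st.2 - 1)
  else (inside, st.2)

def is_parenthese_lvl_fine (condition : String) : Int :=
  (condition.toList.foldl pvStepA (false, 0)).2

-- ===== PORT B =====
-- go(segs): segs[0] balance plus go(segs[2:]); segs[2:] of s :: rest is rest.drop 1
def pvGoB : List (List Char) → Int
  | [] => 0
  | s :: rest =>
      ((PySem.Chars.count s ['('] : Int) - (PySem.Chars.count s [')'] : Int))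
        + pvGoB (rest.drop 1)
termination_by segs => segs.length
decreasing_by simp

def is_parenthese_lvl_fine_alt (condition : String) : Int :=
  pvGoB (PySem.Chars.splitOn condition.toList ['\''])

-- ===== PRECONDITION & SPEC =====
def Spec_is_parenthese_lvl_fine (condition : String) (out : Int) : Prop := out = is_parenthese_lvl_fine_alt condition
instance (condition : String) (out : Int) : Decidable (Spec_is_parenthese_lvl_fine condition out) := by unfold Spec_is_parenthese_lvl_fine; infer_instance

-- ===== CLAIM (what is proved, stated in full; the proofs are below) =====
def Claim_equal_is_parenthese_lvl_fine : Prop := ∀ (condition : String), Dom_is_parenthese_lvl_fine condition → Spec_is_parenthese_lvl_fine condition (is_parenthese_lvl_fine condition)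

-- ===== LEMMAS AND PROOFS =====

-- simple structural splitter on '\'' (proof-side model of PySem.Chars.splitOn _ ['\''])
def pvSplitQ : List Char → List (List Char)
  | [] => [[]]
  | c :: cs =>
      if c = '\'' then [] :: pvSplitQ cs
      else match pvSplitQ cs with
           | [] => [[c]]
           | s :: ss => (c :: s) :: ss

def pvModHead (f : List Char → List Char) : List (List Char) → List (List Char)
  | [] => []
  | s :: ss => f s :: ss

theorem pvSplitQ_ne_nil (cs : List Char) : pvSplitQ cs ≠ [] := by
  induction cs with
  | nil => simp [pvSplitQ]
  | cons c cs ih =>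
    simp only [pvSplitQ]
    split
    · simp
    · cases h : pvSplitQ cs <;> simp

theorem pvCountGo_single (c : Char) :
    ∀ (fuel : Nat) (l : List Char) (acc : Nat), l.length ≤ fuel →
      PySem.Chars.count.go [c] fuel l acc = acc + l.count c := by
  intro fuel
  induction fuel with
  | zero =>
    intro l acc h
    have : l = [] := by cases l <;> simp_all
    subst this; simp [PySem.Chars.count.go]
  | succ n ih =>
    intro l acc h
    cases l with
    | nil => simp [PySem.Chars.count.go]
    | cons a t =>
      simp only [List.length_cons] at h
      have hpre : ([c].isPrefixOf (a :: t)) = (c == a) := by simp [List.isPrefixOf]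
      simp only [PySem.Chars.count.go, hpre]
      by_cases hc : c = a
      · subst hc
        rw [if_pos (by simp)]
        rw [show List.drop [c].length (c :: t) = t by simp]
        rw [ih t (acc + 1) (by omega)]
        simp [List.count_cons]
        omega
      · have hac : (a == c) = false := beq_eq_false_iff_ne.mpr (fun h => hc h.symm)
        rw [if_neg (show ¬((c == a) = true) by simp [hc])]
        rw [ih t acc (by omega)]
        simp [List.count_cons, hac]

theorem pvCount_single (l : List Char) (c : Char) :
    PySem.Chars.count l [c] = l.count c := by
  unfold PySem.Chars.count
  rw [if_neg (by simp)]
  simpa using pvCountGo_single c l.length l 0 (le_refl _)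

theorem pvSplitGo_spec :
    ∀ (fuel : Nat) (l cur : List Char) (acc : List (List Char)), l.length ≤ fuel →
      PySem.Chars.splitOn.go ['\''] fuel l cur acc
        = acc.reverse ++ pvModHead (cur.reverse ++ ·) (pvSplitQ l) := by
  intro fuel
  induction fuel with
  | zero =>
    intro l cur acc h
    have : l = [] := by cases l <;> simp_all
    subst this; simp [PySem.Chars.splitOn.go, pvSplitQ, pvModHead]
  | succ n ih =>
    intro l cur acc h
    cases l with
    | nil => simp [PySem.Chars.splitOn.go, pvSplitQ, pvModHead]
    | cons a t =>
      simp only [List.length_cons] at h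
      have hpre : (['\''].isPrefixOf (a :: t)) = ('\'' == a) := by simp [List.isPrefixOf]
      simp only [PySem.Chars.splitOn.go, hpre]
      by_cases hc : a = '\''
      · subst hc
        rw [if_pos (by simp)]
        rw [show List.drop (['\'']).length ('\'' :: t) = t by simp]
        rw [ih t [] (cur.reverse :: acc) (by omega)]
        cases h' : pvSplitQ t with
        | nil => exact absurd h' (pvSplitQ_ne_nil t)
        | cons s ss =>
            rw [show pvSplitQ ('\'' :: t) = [] :: pvSplitQ t from by simp [pvSplitQ]]
            rw [h']; simp [pvModHead]
      · rw [if_neg (show ¬((('\'' : Char) == a) = true) by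
          simp only [beq_iff_eq]; exact fun h => hc h.symm)]
        rw [ih t (a :: cur) acc (by omega)]
        simp only [pvSplitQ, if_neg hc]
        cases h' : pvSplitQ t with
        | nil => exact absurd h' (pvSplitQ_ne_nil t)
        | cons s ss => simp [pvModHead, h']

theorem pvSplitOn_eq (l : List Char) :
    PySem.Chars.splitOn l ['\''] = pvSplitQ l := by
  simp only [PySem.Chars.splitOn]
  rw [pvSplitGo_spec (l.length + 1) l [] [] (by omega)]
  cases h : pvSplitQ l with
  | nil => exact absurd h (pvSplitQ_ne_nil l)
  | cons s ss => simp [pvModHead]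

def pvDelta (c : Char) : Int :=
  if c = '(' then 1 else if c = ')' then -1 else 0

theorem pvGoB_cons (s : List Char) (rest : List (List Char)) :
    pvGoB (s :: rest) = ((s.count '(' : Int) - (s.count ')' : Int)) + pvGoB (rest.drop 1) := by
  rw [pvGoB, pvCount_single, pvCount_single]

-- step lemmas for pvStepA
theorem pvStepA_false_quote (lvl : Int) : pvStepA (false, lvl) '\'' = (true, lvl) := rfl

theorem pvStepA_true_quote (lvl : Int) : pvStepA (true, lvl) '\'' = (false, lvl) := rfl

theorem pvStepA_false (lvl : Int) (c : Char) (hc : c ≠ '\'') :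
    pvStepA (false, lvl) c = (false, lvl + pvDelta c) := by
  simp only [pvStepA, pvDelta, if_neg hc]
  split_ifs <;> simp_all <;> ring

theorem pvStepA_true (lvl : Int) (c : Char) (hc : c ≠ '\'') :
    pvStepA (true, lvl) c = (true, lvl) := by
  simp [pvStepA, hc]

-- main invariant of A's fold in terms of B's recursion over pvSplitQ
theorem pvFold_spec (cs : List Char) :
    ∀ (lvl : Int),
      ((cs.foldl pvStepA (false, lvl)).2 = lvl + pvGoB (pvSplitQ cs))
      ∧ ((cs.foldl pvStepA (true, lvl)).2 = lvl + pvGoB ((pvSplitQ cs).drop 1)) := by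
  induction cs with
  | nil =>
    intro lvl
    simp [pvSplitQ, pvGoB_cons, pvGoB]
  | cons c cs ih =>
    intro lvl
    by_cases hc : c = '\''
    · subst hc
      constructor
      · rw [List.foldl_cons, pvStepA_false_quote, (ih lvl).2]
        cases h' : pvSplitQ cs with
        | nil => exact absurd h' (pvSplitQ_ne_nil cs)
        | cons s ss => simp [pvSplitQ, h', pvGoB_cons, pvGoB]
      · rw [List.foldl_cons, pvStepA_true_quote, (ih lvl).1]
        simp [pvSplitQ]
    · constructor
      · rw [List.foldl_cons, pvStepA_false lvl c hc, (ih (lvl + pvDelta c)).1]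
        cases h' : pvSplitQ cs with
        | nil => exact absurd h' (pvSplitQ_ne_nil cs)
        | cons s ss =>
          simp only [pvSplitQ, if_neg hc, h', pvGoB_cons, List.count_cons, pvDelta]
          by_cases h1 : c = '('
          · subst h1; simp; omega
          · by_cases h2 : c = ')'
            · subst h2
              have : ¬(')' : Char) = '(' := by decide
              simp [this]
              omega
            · have ha : (c == '(') = false := beq_eq_false_iff_ne.mpr h1
              have hb : (c == ')') = false := beq_eq_false_iff_ne.mpr h2
              simp [h1, h2, ha, hb]
      · rw [List.foldl_cons, pvStepA_true lvl c hc, (ih lvl).2]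
        simp only [pvSplitQ, if_neg hc]
        cases h' : pvSplitQ cs with
        | nil => exact absurd h' (pvSplitQ_ne_nil cs)
        | cons s ss => simp [h']

-- ===== VERDICT (by name: the statement is the Claim_ definition above) =====
theorem is_parenthese_lvl_fine_spec : Claim_equal_is_parenthese_lvl_fine := by
  intro condition _
  unfold Spec_is_parenthese_lvl_fine is_parenthese_lvl_fine is_parenthese_lvl_fine_alt
  rw [pvSplitOn_eq, (pvFold_spec condition.toList 0).1]
  ring
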